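-- pv_equiv track=rewrite | github.com/ifNotErrorRun/AlgorithmStudy | sehun/2024/11week/BOJ_4659.py | check_second
-- ===== SOURCE A (Python) =====
-- def vowol_cheker(input: str):
--     return any(char in "aeiou" for char in input)
--
-- def check_second(input: str):
--     # 자모음 각각 3개 연속해서 나오는지 체크
--     vowol_count = 0
--     cons_count = 0
--     for char in input:
--         # 모음일 때 vowol_count++, cons_count는 초기화
--         if vowol_cheker(char):
--             vowol_count += 1
--             cons_count = 0
--         # 자음일 때 vowol_count초기화, cons_count++
--         else:
--             vowol_count = 0
--             cons_count += 1
--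
--         if vowol_count == 3 or cons_count == 3:
--             return False
--
--     return True
-- ===== SOURCE B (Python) =====
-- def check_second(input: str):
--     V = set("aeiou")
--     return not any((a in V) == (b in V) == (c in V)
--                    for a, b, c in zip(input, input[1:], input[2:]))
-- ===== Notes on version B (the rewrite author's own statement) =====
-- stated objective: simpler
-- what changed: Replaces the two run counters with their reset logic by a single sliding-window test over all 3-character windows (zip of the string with its two shifts), returning False iff some window has all three characters of the same vowel/consonant class.
import Mathlib
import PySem

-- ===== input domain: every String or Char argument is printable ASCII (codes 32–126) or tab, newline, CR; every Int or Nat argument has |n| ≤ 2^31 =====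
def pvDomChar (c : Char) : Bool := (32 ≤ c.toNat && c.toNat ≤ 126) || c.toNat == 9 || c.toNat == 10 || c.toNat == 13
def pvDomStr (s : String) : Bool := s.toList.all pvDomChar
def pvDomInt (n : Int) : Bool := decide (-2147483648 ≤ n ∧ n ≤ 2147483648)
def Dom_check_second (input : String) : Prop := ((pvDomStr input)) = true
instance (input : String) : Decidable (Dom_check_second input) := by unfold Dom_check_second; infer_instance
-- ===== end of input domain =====

-- B replaces A's two run counters and reset logic by a sliding-window test over all 3-char windows (simpler decomposition; same cost).


-- ===== PORT A =====
-- 'char in "aeiou"' on a 1-char string = membership of that char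
def vowol_cheker (input : String) : Bool :=
  input.toList.any (fun char => ("aeiou".toList).contains char)

-- A's for-loop with the two counters and early return, as structural recursion
def check_second_loop : List Char → Int → Int → Bool
  | [], _, _ => true
  | char :: rest, vowol_count, cons_count =>
    if vowol_cheker (String.ofList [char]) then
      if vowol_count + 1 == 3 || (0 : Int) == 3 then false
      else check_second_loop rest (vowol_count + 1) 0
    else
      if (0 : Int) == 3 || cons_count + 1 == 3 then false
      else check_second_loop rest 0 (cons_count + 1)

def check_second (input : String) : Bool :=
  check_second_loop input.toList 0 0

-- ===== PORT B =====
def clsB (c : Char) : Bool := ("aeiou".toList).contains c   -- c in V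

def check_second_alt (input : String) : Bool :=
  let l := input.toList
  !((l.zip ((l.drop 1).zip (l.drop 2))).any
      (fun t => (clsB t.1 == clsB t.2.1) && (clsB t.2.1 == clsB t.2.2)))

-- ===== PRECONDITION & SPEC =====
def Spec_check_second (input : String) (out : Bool) : Prop := out = check_second_alt input
instance (input : String) (out : Bool) : Decidable (Spec_check_second input out) := by unfold Spec_check_second; infer_instance

-- ===== CLAIM (what is proved, stated in full; the proofs are below) =====
def Claim_equal_check_second : Prop := ∀ (input : String), Dom_check_second input → Spec_check_second input (check_second input)

-- ===== LEMMAS AND PROOFS =====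

-- "no 3 consecutive same-class chars", on the class (Bool) list
def noT : List Bool → Bool
  | a :: b :: c :: r => !((a == b) && (b == c)) && noT (b :: c :: r)
  | _ => true

theorem vc_single (ch : Char) : vowol_cheker (String.ofList [ch]) = clsB ch := by
  simp [vowol_cheker, clsB]

theorem noT_break (a : Bool) (m : List Bool) : noT (a :: (!a) :: m) = noT ((!a) :: m) := by
  cases m with
  | nil => cases a <;> rfl
  | cons x r => cases a <;> simp [noT]

theorem noT_break2 (a : Bool) (m : List Bool) : noT (a :: a :: (!a) :: m) = noT ((!a) :: m) := by
  have h := noT_break a m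
  cases a <;> simp [noT] at h ⊢ <;> exact h

theorem alt_noT (l : List Char) :
    (!((l.zip ((l.drop 1).zip (l.drop 2))).any
      (fun t => (clsB t.1 == clsB t.2.1) && (clsB t.2.1 == clsB t.2.2)))) = noT (l.map clsB) := by
  match l with
  | [] => rfl
  | [a] => rfl
  | [a, b] => rfl
  | a :: b :: c :: r =>
    have ih := alt_noT (b :: c :: r)
    simp only [List.drop, List.zip_cons_cons, List.any_cons, List.map_cons, noT] at ih ⊢
    rw [Bool.not_or, ih]

theorem keyA (l : List Char) (v c : Nat) (hv : v ≤ 2) (hc : c ≤ 2) (h0 : v = 0 ∨ c = 0) :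
    check_second_loop l (v : Int) (c : Int) =
      noT (List.replicate v true ++ List.replicate c false ++ l.map clsB) := by
  induction l generalizing v c with
  | nil =>
    interval_cases v <;> interval_cases c <;> simp_all [check_second_loop, noT, List.replicate]
  | cons ch rest ih =>
    have hstate : (v = 0 ∧ c = 0) ∨ (v = 1 ∧ c = 0) ∨ (v = 2 ∧ c = 0) ∨
        (v = 0 ∧ c = 1) ∨ (v = 0 ∧ c = 2) := by omega
    have h10 : check_second_loop rest (1 : Int) 0 = noT (true :: rest.map clsB) := by
      have h := ih 1 0 (by omega) (by omega) (by omega); norm_num [List.replicate] at h; exact h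
    have h20 : check_second_loop rest (2 : Int) 0 = noT (true :: true :: rest.map clsB) := by
      have h := ih 2 0 (by omega) (by omega) (by omega); norm_num [List.replicate] at h; exact h
    have h01 : check_second_loop rest (0 : Int) 1 = noT (false :: rest.map clsB) := by
      have h := ih 0 1 (by omega) (by omega) (by omega); norm_num [List.replicate] at h; exact h
    have h02 : check_second_loop rest (0 : Int) 2 = noT (false :: false :: rest.map clsB) := by
      have h := ih 0 2 (by omega) (by omega) (by omega); norm_num [List.replicate] at h; exact h
    have hstep : check_second_loop (ch :: rest) (v : Int) (c : Int) =
        (if clsB ch then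
          if (v : Int) + 1 == 3 || (0 : Int) == 3 then false
          else check_second_loop rest ((v : Int) + 1) 0
        else
          if (0 : Int) == 3 || (c : Int) + 1 == 3 then false
          else check_second_loop rest 0 ((c : Int) + 1)) := by
      simp [check_second_loop, vc_single]
    rcases hstate with ⟨rfl, rfl⟩ | ⟨rfl, rfl⟩ | ⟨rfl, rfl⟩ | ⟨rfl, rfl⟩ | ⟨rfl, rfl⟩ <;>
      cases hch : clsB ch <;>
      rw [hstep] <;> norm_num [hch, List.replicate]
    all_goals first
      | rw [h10] | rw [h20] | rw [h01] | rw [h02]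
      | simp [noT]
    all_goals first
      | (have h := noT_break true (rest.map clsB); simp only [Bool.not_true] at h; rw [h])
      | (have h := noT_break2 true (rest.map clsB); simp only [Bool.not_true] at h; rw [h])
      | (have h := noT_break false (rest.map clsB); simp only [Bool.not_false] at h; rw [h])
      | (have h := noT_break2 false (rest.map clsB); simp only [Bool.not_false] at h; rw [h])

theorem check_second_spec : Claim_equal_check_second := by
  intro input _
  unfold Spec_check_second check_second check_second_alt
  have h := keyA input.toList 0 0 (by omega) (by omega) (Or.inl rfl)
  simp only [Nat.cast_zero, List.replicate, List.nil_append] at h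
  rw [h, alt_noT]
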